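-- pv_equiv track=rewrite | github.com/amazon-science/NeoQA | src/mglockne_story_line/data_export/export_utils.py | is_sufficient
-- ===== SOURCE A (Python) =====
-- from typing import List, Dict, Tuple, Optional, Set
--
-- def is_sufficient(evidence_ids: List[str], all_articles: List[Dict]):
--     all_evidence_ids = set([
--         _id for article in all_articles for _id in article['content']['used_sentence_ids']
--     ])
--
--     has_id = True
--     for evidence_id in evidence_ids:
--         if evidence_id not in all_evidence_ids:
--             has_id = False
--     return has_id
-- ===== SOURCE B (Python) =====
-- def is_sufficient(evidence_ids, all_articles):
--     remaining = set(evidence_ids)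
--     for article in all_articles:
--         if not remaining:
--             break
--         remaining -= set(article['content']['used_sentence_ids'])
--     return not remaining
-- ===== Notes on version B (the rewrite author's own statement) =====
-- stated objective: alternative
-- what changed: Instead of building the union of all used_sentence_ids and then scanning evidence_ids, B maintains the set of still-unfound evidence ids and subtracts each article's ids from it in one pass, breaking early once it is empty.
import Mathlib
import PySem

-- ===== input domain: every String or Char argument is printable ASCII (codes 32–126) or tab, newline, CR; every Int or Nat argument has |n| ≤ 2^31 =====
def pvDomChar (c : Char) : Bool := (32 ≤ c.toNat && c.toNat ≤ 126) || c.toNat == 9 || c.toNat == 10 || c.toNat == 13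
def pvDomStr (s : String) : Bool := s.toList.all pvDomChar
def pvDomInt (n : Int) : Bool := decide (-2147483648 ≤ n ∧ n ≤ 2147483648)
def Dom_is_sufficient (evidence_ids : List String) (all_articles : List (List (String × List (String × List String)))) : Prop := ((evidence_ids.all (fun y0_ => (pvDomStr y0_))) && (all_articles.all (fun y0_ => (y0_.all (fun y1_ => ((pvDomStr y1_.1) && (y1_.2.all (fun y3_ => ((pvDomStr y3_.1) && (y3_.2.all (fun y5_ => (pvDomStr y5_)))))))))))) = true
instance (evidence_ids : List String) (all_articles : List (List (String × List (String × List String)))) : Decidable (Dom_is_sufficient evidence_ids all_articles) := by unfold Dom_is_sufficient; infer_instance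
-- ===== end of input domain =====

-- B maintains the set of still-unfound evidence ids and subtracts each article's ids in one pass
-- (early break when empty), instead of A's full union set followed by a membership scan.

-- shared accessor for article['content']['used_sentence_ids'] (total via getD; Pre_ guarantees the keys exist)
def pvUsedIds (article : List (String × List (String × List String))) : List String :=
  PySem.Dict.getD (PySem.Dict.mk (PySem.Dict.getD (PySem.Dict.mk article) "content" [])) "used_sentence_ids" []

-- ===== PORT A =====
def is_sufficient (evidence_ids : List String) (all_articles : List (List (String × List (String × List String)))) : Bool :=
  let all_evidence_ids : PySem.Set String :=
    PySem.Set.ofList (all_articles.flatMap (fun article => pvUsedIds article))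
  evidence_ids.foldl
    (fun has_id evidence_id =>
      if PySem.Set.contains all_evidence_ids evidence_id then has_id else false)
    true

-- ===== PORT B =====
def pvAltLoop (remaining : PySem.Set String) : List (List (String × List (String × List String))) → PySem.Set String
  | [] => remaining
  | article :: rest =>
      if remaining.isEmpty then remaining
      else pvAltLoop (PySem.Set.diff remaining (PySem.Set.ofList (pvUsedIds article))) rest

def is_sufficient_alt (evidence_ids : List String) (all_articles : List (List (String × List (String × List String)))) : Bool :=
  (pvAltLoop (PySem.Set.ofList evidence_ids) all_articles).isEmpty

-- ===== PRECONDITION & SPEC =====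
-- Pre_ excludes inputs where an article lacks the 'content' key or its content lacks
-- 'used_sentence_ids': Python A (and B) raise KeyError there.
def Pre_is_sufficient (evidence_ids : List String) (all_articles : List (List (String × List (String × List String)))) : Prop :=
  ∀ article ∈ all_articles,
    (PySem.Dict.get? (PySem.Dict.mk article) "content").isSome = true ∧
    (PySem.Dict.get? (PySem.Dict.mk (PySem.Dict.getD (PySem.Dict.mk article) "content" [])) "used_sentence_ids").isSome = true
instance (evidence_ids : List String) (all_articles : List (List (String × List (String × List String)))) : Decidable (Pre_is_sufficient evidence_ids all_articles) := by unfold Pre_is_sufficient; infer_instance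

def pvWitness_is_sufficient : List String × (List (List (String × List (String × List String)))) :=
  (["s1"], [[("content", [("used_sentence_ids", ["s1", "s2"])])]])

def Spec_is_sufficient (evidence_ids : List String) (all_articles : List (List (String × List (String × List String)))) (out : Bool) : Prop := out = is_sufficient_alt evidence_ids all_articles
instance (evidence_ids : List String) (all_articles : List (List (String × List (String × List String)))) (out : Bool) : Decidable (Spec_is_sufficient evidence_ids all_articles out) := by unfold Spec_is_sufficient; infer_instance

-- ===== CLAIM (what is proved, stated in full; the proofs are below) =====
def Claim_equal_is_sufficient : Prop := ∀ (evidence_ids : List String) (all_articles : List (List (String × List (String × List String)))), Dom_is_sufficient evidence_ids all_articles → Pre_is_sufficient evidence_ids all_articles → Spec_is_sufficient evidence_ids all_articles (is_sufficient evidence_ids all_articles)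

-- ===== LEMMAS AND PROOFS =====

-- A's fold returns acc && "every evidence id is in the set"
theorem pv_foldl_all (S : PySem.Set String) (l : List String) (acc : Bool) :
    l.foldl (fun has_id e => if PySem.Set.contains S e then has_id else false) acc
      = (acc && l.all (fun e => PySem.Set.contains S e)) := by
  induction l generalizing acc with
  | nil => simp
  | cons x xs ih =>
      simp only [List.foldl_cons, List.all_cons, ih]
      cases acc <;> by_cases h : PySem.Set.contains S x = true <;> simp [h]

-- B's elimination loop ends empty iff every remaining id occurs in some article
theorem pv_altLoop_empty (as : List (List (String × List (String × List String))))
    (r : PySem.Set String) :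
    (pvAltLoop r as = [] ↔ ∀ x ∈ r, x ∈ as.flatMap (fun a => pvUsedIds a)) := by
  induction as generalizing r with
  | nil => simp [pvAltLoop, List.eq_nil_iff_forall_not_mem]
  | cons a rest ih =>
      simp only [pvAltLoop]
      by_cases h : r.isEmpty = true
      · have hr : r = [] := List.isEmpty_iff.mp h
        subst hr; simp
      · rw [if_neg h, ih]
        simp only [PySem.Set.mem_diff, PySem.Set.mem_ofList, List.flatMap_cons, List.mem_append]
        constructor
        · intro H x hx
          by_cases hm : x ∈ pvUsedIds a
          · exact Or.inl hm
          · exact Or.inr (H x ⟨hx, hm⟩)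
        · intro H x hx
          rcases hx with ⟨hxr, hxa⟩
          rcases H x hxr with h1 | h2
          · exact absurd h1 hxa
          · exact h2

-- ===== VERDICT (by name: the statement is the Claim_ definition above) =====
theorem is_sufficient_spec : Claim_equal_is_sufficient := by
  intro evidence_ids all_articles _ _
  unfold Spec_is_sufficient is_sufficient is_sufficient_alt
  apply Bool.eq_iff_iff.mpr
  rw [pv_foldl_all, List.isEmpty_iff, pv_altLoop_empty]
  simp [PySem.Set.mem_ofList]
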